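-- pv_equiv track=rewrite | github.com/dodaucy/steam-details | src/steam_details/utils.py | roman_string_to_int_string
-- ===== SOURCE A (Python) =====
-- _ROMAN_DIGITS = [
--     (1000, "M"), (900, "CM"), (500, "D"),
--     (400, "CD"), (100, "C"), (90, "XC"),
--     (50, "L"), (40, "XL"), (10, "X"),
--     (9, "IX"), (5, "V"), (4, "IV"),
--     (1, "I")
-- ]
--
-- _ROMAN_VALUES = {"I": 1, "V": 5, "X": 10, "L": 50, "C": 100, "D": 500, "M": 1000}
--
-- def int_to_roman(num: int) -> str:
--     """Convert integers to roman numbers."""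
--     roman = ""
--     i = 0
--     while num > 0:
--         for _ in range(num // _ROMAN_DIGITS[i][0]):
--             roman += _ROMAN_DIGITS[i][1]
--             num -= _ROMAN_DIGITS[i][0]
--         i += 1
--     return roman
--
-- def roman_to_int(roman: str) -> int | None:
--     """
--     Convert roman numbers to integers or return None if the input is invalid.
--
--     Examples:
--     1. II -> 2
--     2. VI -> 6
--     3. XIX -> 19
--
--     """
--     if not roman:  # Empty string
--         return
--
--     total = 0
--     prev_value = 0
--
--     for char in roman:
--         if char not in _ROMAN_VALUES:  # Invalid character
--             return
--
--         current_value = _ROMAN_VALUES[char]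
--
--         # If previous value is less, subtract it (for things like IV, IX)
--         if current_value > prev_value:
--             total += current_value - 2 * prev_value
--         else:
--             total += current_value
--
--         prev_value = current_value
--
--     # Validate that the final result
--     if int_to_roman(total) != roman:
--         return
--
--     return total
--
-- def roman_string_to_int_string(string_with_roman: str) -> str:
--     """Convert a string that includes roman numbers to one that only includes integers."""
--     name_list = []
--     for word in string_with_roman.split(" "):
--         int_word = roman_to_int(word)
--         if int_word is None:
--             name_list.append(word)
--         else:
--             name_list.append(str(int_word))
--     return " ".join(name_list)
-- ===== SOURCE B (Python) =====
-- _HUNDREDS = ["", "C", "CC", "CCC", "CD", "D", "DC", "DCC", "DCCC", "CM"]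
-- _TENS = ["", "X", "XX", "XXX", "XL", "L", "LX", "LXX", "LXXX", "XC"]
-- _UNITS = ["", "I", "II", "III", "IV", "V", "VI", "VII", "VIII", "IX"]
--
--
-- def _match_group(s, reps):
--     """Greedily match one positional roman digit group; return (digit, rest)."""
--     for d in range(9, -1, -1):
--         if s.startswith(reps[d]):
--             return d, s[len(reps[d]):]
--     return 0, s  # unreachable: reps[0] == "" always matches
--
--
-- def _word_value(word):
--     """Value of a canonical roman numeral, or None if word is not one."""
--     if not word:
--         return None
--     m = 0
--     s = word
--     while s.startswith("M"):
--         m += 1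
--         s = s[1:]
--     h, s = _match_group(s, _HUNDREDS)
--     t, s = _match_group(s, _TENS)
--     u, s = _match_group(s, _UNITS)
--     if s:
--         return None
--     return 1000 * m + 100 * h + 10 * t + u
--
--
-- def roman_string_to_int_string(string_with_roman: str) -> str:
--     """Convert a string that includes roman numbers to one that only includes integers."""
--     name_list = []
--     for word in string_with_roman.split(" "):
--         int_word = _word_value(word)
--         if int_word is None:
--             name_list.append(word)
--         else:
--             name_list.append(str(int_word))
--     return " ".join(name_list)
-- ===== Notes on version B (the rewrite author's own statement) =====
-- stated objective: simpler
-- what changed: Per-word conversion no longer sums char values and validates via an int_to_roman round trip; instead each word is parsed directly as canonical roman form (M* prefix, then greedy table match of the hundreds/tens/units digit groups) and its value is assembled from the parsed digits.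
import Mathlib
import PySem

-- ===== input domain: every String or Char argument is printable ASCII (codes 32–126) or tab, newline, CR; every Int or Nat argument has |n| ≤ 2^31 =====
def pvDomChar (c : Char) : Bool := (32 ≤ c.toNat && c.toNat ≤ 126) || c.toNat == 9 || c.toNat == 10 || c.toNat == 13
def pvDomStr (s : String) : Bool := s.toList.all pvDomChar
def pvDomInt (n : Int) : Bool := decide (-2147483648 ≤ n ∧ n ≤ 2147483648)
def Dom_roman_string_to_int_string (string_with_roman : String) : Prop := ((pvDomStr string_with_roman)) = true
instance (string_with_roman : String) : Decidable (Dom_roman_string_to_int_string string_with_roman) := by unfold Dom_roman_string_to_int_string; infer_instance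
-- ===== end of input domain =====

-- B replaces A's per-word generate-and-compare validation (subtractive sum, then int_to_roman
-- round trip) with a direct greedy parse of the canonical roman digit groups (M*, hundreds,
-- tens, units); objective: simpler per-word conversion, same outer split/map/join.

-- ===== PORT A =====
def romanDigits : List (Int × List Char) :=
  [(1000, ['M']), (900, ['C','M']), (500, ['D']),
   (400, ['C','D']), (100, ['C']), (90, ['X','C']),
   (50, ['L']), (40, ['X','L']), (10, ['X']),
   (9, ['I','X']), (5, ['V']), (4, ['I','V']),
   (1, ['I'])]

def romanValues : List (Char × Int) :=
  [('I', 1), ('V', 5), ('X', 10), ('L', 50), ('C', 100), ('D', 500), ('M', 1000)]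

-- the inner `for _ in range(num // v)` loop of int_to_roman
def intToRomanInner (s : List Char) (v : Int) : Nat → List Char × Int → List Char × Int
  | 0, st => st
  | n + 1, (roman, num) => intToRomanInner s v n (roman ++ s, num - v)

-- the `while num > 0` loop of int_to_roman, walking the digit list; the [] case is
-- Python's IndexError, unreachable for the totals romanToInt feeds in
def intToRomanGo : List (Int × List Char) → List Char → Int → List Char
  | [], roman, _ => roman
  | (v, s) :: rest, roman, num =>
    if num > 0 then
      let st := intToRomanInner s v (PySem.Int.floordiv num v).toNat (roman, num)
      intToRomanGo rest st.1 st.2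
    else roman

def intToRoman (num : Int) : List Char := intToRomanGo romanDigits [] num

-- the `for char in roman` loop of roman_to_int with state (total, prev_value)
def romanToIntGo : List Char → Int → Int → Option Int
  | [], total, _ => some total
  | c :: rest, total, prev =>
    match romanValues.lookup c with
    | none => none
    | some cur =>
      romanToIntGo rest (if cur > prev then total + (cur - 2 * prev) else total + cur) cur

def romanToInt (roman : List Char) : Option Int :=
  if roman = [] then none
  else
    match romanToIntGo roman 0 0 with
    | none => none
    | some total => if intToRoman total ≠ roman then none else some total

def roman_string_to_int_string (string_with_roman : String) : String :=
  String.ofList (PySem.Chars.join [' ']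
    ((PySem.Chars.splitOn string_with_roman.toList [' ']).map (fun w =>
      match romanToInt w with
      | none => w
      | some n => PySem.Int.toChars n)))

-- ===== PORT B =====
def hundredsReps : List (List Char) :=
  [[], ['C'], ['C','C'], ['C','C','C'], ['C','D'], ['D'], ['D','C'], ['D','C','C'], ['D','C','C','C'], ['C','M']]

def tensReps : List (List Char) :=
  [[], ['X'], ['X','X'], ['X','X','X'], ['X','L'], ['L'], ['L','X'], ['L','X','X'], ['L','X','X','X'], ['X','C']]

def unitsReps : List (List Char) :=
  [[], ['I'], ['I','I'], ['I','I','I'], ['I','V'], ['V'], ['V','I'], ['V','I','I'], ['V','I','I','I'], ['I','X']]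

-- `for d in range(9, -1, -1): if s.startswith(reps[d]): return d, s[len(reps[d]):]`
def matchGroupGo (s : List Char) (reps : List (List Char)) : List Nat → Nat × List Char
  | [] => (0, s)   -- unreachable: reps[0] = "" always matches
  | d :: ds =>
    if (reps.getD d []).isPrefixOf s then (d, s.drop (reps.getD d []).length)
    else matchGroupGo s reps ds

def matchGroup (s : List Char) (reps : List (List Char)) : Nat × List Char :=
  matchGroupGo s reps [9, 8, 7, 6, 5, 4, 3, 2, 1, 0]

-- `while s.startswith("M")`
def stripM : List Char → Nat × List Char
  | [] => (0, [])
  | c :: rest => if c = 'M' then let p := stripM rest; (p.1 + 1, p.2) else (0, c :: rest)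

def wordValue (w : List Char) : Option Int :=
  if w = [] then none
  else
    if (matchGroup (matchGroup (matchGroup (stripM w).2 hundredsReps).2 tensReps).2 unitsReps).2 = [] then
      some (1000 * ((stripM w).1 : Int)
            + 100 * (matchGroup (stripM w).2 hundredsReps).1
            + 10 * (matchGroup (matchGroup (stripM w).2 hundredsReps).2 tensReps).1
            + (matchGroup (matchGroup (matchGroup (stripM w).2 hundredsReps).2 tensReps).2 unitsReps).1)
    else none

def roman_string_to_int_string_alt (string_with_roman : String) : String :=
  String.ofList (PySem.Chars.join [' ']
    ((PySem.Chars.splitOn string_with_roman.toList [' ']).map (fun w =>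
      match wordValue w with
      | none => w
      | some n => PySem.Int.toChars n)))

-- ===== PRECONDITION & SPEC =====
def Spec_roman_string_to_int_string (string_with_roman : String) (out : String) : Prop := out = roman_string_to_int_string_alt string_with_roman
instance (string_with_roman : String) (out : String) : Decidable (Spec_roman_string_to_int_string string_with_roman out) := by unfold Spec_roman_string_to_int_string; infer_instance

-- ===== CLAIM (what is proved, stated in full; the proofs are below) =====
def Claim_equal_roman_string_to_int_string : Prop := ∀ (string_with_roman : String), Dom_roman_string_to_int_string string_with_roman → Spec_roman_string_to_int_string string_with_roman (roman_string_to_int_string string_with_roman)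

-- ===== LEMMAS AND PROOFS =====

-- the canonical roman numeral with thousands m and hundreds/tens/units digits h t u
def canon (m h t u : Nat) : List Char :=
  List.replicate m 'M' ++ (hundredsReps.getD h [] ++ (tensReps.getD t [] ++ unitsReps.getD u []))

def rest12 : List (Int × List Char) := romanDigits.tail

-- ---- finite checks (decide) ----

set_option maxHeartbeats 4000000 in
theorem greedy_h : ∀ h < 10, ∀ t < 10, ∀ u < 10,
    matchGroup (hundredsReps.getD h [] ++ (tensReps.getD t [] ++ unitsReps.getD u [])) hundredsReps
      = (h, tensReps.getD t [] ++ unitsReps.getD u []) := by decide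

set_option maxHeartbeats 4000000 in
theorem greedy_t : ∀ t < 10, ∀ u < 10,
    matchGroup (tensReps.getD t [] ++ unitsReps.getD u []) tensReps
      = (t, unitsReps.getD u []) := by decide

theorem greedy_u : ∀ u < 10,
    matchGroup (unitsReps.getD u []) unitsReps = (u, []) := by decide

set_option maxHeartbeats 4000000 in
theorem low_eval : ∀ h < 10, ∀ t < 10, ∀ u < 10,
    romanToIntGo (hundredsReps.getD h [] ++ (tensReps.getD t [] ++ unitsReps.getD u [])) 0 0
        = some ((100 * h + 10 * t + u : Nat) : Int)
      ∧ romanToIntGo (hundredsReps.getD h [] ++ (tensReps.getD t [] ++ unitsReps.getD u [])) 0 1000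
        = some ((100 * h + 10 * t + u : Nat) : Int) := by decide

set_option maxHeartbeats 4000000 in
set_option maxRecDepth 100000 in
theorem low_toRoman : ∀ h < 10, ∀ t < 10, ∀ u < 10,
    intToRomanGo rest12 [] ((100 * h + 10 * t + u : Nat) : Int)
      = hundredsReps.getD h [] ++ (tensReps.getD t [] ++ unitsReps.getD u []) := by decide

set_option maxHeartbeats 4000000 in
theorem headNotM : ∀ h < 10, ∀ t < 10, ∀ u < 10,
    (hundredsReps.getD h [] ++ (tensReps.getD t [] ++ unitsReps.getD u [])).head? ≠ some 'M' := by decide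

-- ---- stripM ----

theorem stripM_decomp (w : List Char) :
    w = List.replicate (stripM w).1 'M' ++ (stripM w).2 := by
  induction w with
  | nil => simp [stripM]
  | cons c rest ih =>
    by_cases hc : c = 'M'
    · subst hc
      simp only [stripM]
      exact congrArg _ ih
    · simp [stripM, hc]

theorem stripM_replicate (m : Nat) (r : List Char)
    (hr : ∀ c, r.head? = some c → c ≠ 'M') :
    stripM (List.replicate m 'M' ++ r) = (m, r) := by
  induction m with
  | zero =>
    cases r with
    | nil => simp [stripM]
    | cons c rest =>
      have : c ≠ 'M' := hr c rfl
      simp [stripM, this]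
  | succ k ih => simp [List.replicate_succ, stripM, ih]

-- ---- matchGroup decomposition ----

theorem matchGroupGo_decomp (reps : List (List Char)) (h0 : reps.getD 0 [] = []) :
    ∀ (ds : List Nat) (s : List Char), (∀ d ∈ ds, d < 10) →
      (matchGroupGo s reps ds).1 < 10 ∧
        s = reps.getD (matchGroupGo s reps ds).1 [] ++ (matchGroupGo s reps ds).2 := by
  intro ds
  induction ds with
  | nil =>
    intro s _
    refine ⟨by norm_num [matchGroupGo], ?_⟩
    rw [matchGroupGo, h0]
    rfl
  | cons d ds ih =>
    intro s hds
    by_cases hp : (reps.getD d []).isPrefixOf s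
    · have h1 : matchGroupGo s reps (d :: ds) = (d, s.drop (reps.getD d []).length) := by
        rw [matchGroupGo, if_pos hp]
      rw [h1]
      obtain ⟨tl, rfl⟩ := List.isPrefixOf_iff_prefix.mp hp
      exact ⟨hds d (List.mem_cons_self), by rw [List.drop_left]⟩
    · have h1 : matchGroupGo s reps (d :: ds) = matchGroupGo s reps ds := by
        rw [matchGroupGo, if_neg hp]
      rw [h1]
      exact ih s (fun x hx => hds x (List.mem_cons_of_mem _ hx))

theorem matchGroup_decomp (reps : List (List Char)) (h0 : reps.getD 0 [] = [])
    (s : List Char) :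
    (matchGroup s reps).1 < 10 ∧
      s = reps.getD (matchGroup s reps).1 [] ++ (matchGroup s reps).2 :=
  matchGroupGo_decomp reps h0 _ s (by decide)

-- ---- B characterisation ----

theorem wordValue_some {w : List Char} {n : Int} (hB : wordValue w = some n) :
    ∃ m h t u, h < 10 ∧ t < 10 ∧ u < 10 ∧ w = canon m h t u ∧
      n = 1000 * (m : Int) + 100 * h + 10 * t + u := by
  by_cases hw : w = []
  · rw [hw] at hB; simp [wordValue] at hB
  obtain ⟨m, s1, e0⟩ : ∃ a b, stripM w = (a, b) := ⟨_, _, rfl⟩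
  obtain ⟨h, s2, e1⟩ : ∃ a b, matchGroup s1 hundredsReps = (a, b) := ⟨_, _, rfl⟩
  obtain ⟨t, s3, e2⟩ : ∃ a b, matchGroup s2 tensReps = (a, b) := ⟨_, _, rfl⟩
  obtain ⟨u, s4, e3⟩ : ∃ a b, matchGroup s3 unitsReps = (a, b) := ⟨_, _, rfl⟩
  have d0 := stripM_decomp w
  rw [e0] at d0
  have d1 := matchGroup_decomp hundredsReps (by decide) s1
  rw [e1] at d1
  have d2 := matchGroup_decomp tensReps (by decide) s2
  rw [e2] at d2
  have d3 := matchGroup_decomp unitsReps (by decide) s3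
  rw [e3] at d3
  unfold wordValue at hB
  rw [if_neg hw, e0] at hB
  simp only at hB
  rw [e1] at hB
  simp only at hB
  rw [e2] at hB
  simp only at hB
  rw [e3] at hB
  simp only at hB
  by_cases hend : s4 = []
  · rw [if_pos hend] at hB
    refine ⟨m, h, t, u, d1.1, d2.1, d3.1, ?_, (Option.some_inj.mp hB).symm⟩
    have d3' := d3.2
    rw [hend, List.append_nil] at d3'
    rw [d0, d1.2, d2.2, d3']
    rfl
  · rw [if_neg hend] at hB
    exact absurd hB (by simp)

theorem wordValue_canon (m h t u : Nat) (hh : h < 10) (ht : t < 10) (hu : u < 10)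
    (hne : canon m h t u ≠ []) :
    wordValue (canon m h t u) = some (1000 * (m : Int) + 100 * h + 10 * t + u) := by
  have hs : stripM (canon m h t u)
      = (m, hundredsReps.getD h [] ++ (tensReps.getD t [] ++ unitsReps.getD u [])) := by
    unfold canon
    exact stripM_replicate m _ (fun c hc hcM => headNotM h hh t ht u hu (hcM ▸ hc))
  unfold wordValue
  rw [if_neg hne, hs]
  simp only
  rw [greedy_h h hh t ht u hu]
  simp only
  rw [greedy_t t ht u hu]
  simp only
  rw [greedy_u u hu]
  simp

-- ---- A-side evaluation ----

theorem romanToIntGo_shift (s : List Char) :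
    ∀ (total prev : Int),
      romanToIntGo s total prev = (romanToIntGo s 0 prev).map (total + ·) := by
  induction s with
  | nil => intro total prev; simp [romanToIntGo]
  | cons c rest ih =>
    intro total prev
    unfold romanToIntGo
    cases hc : romanValues.lookup c with
    | none => simp
    | some cur =>
      simp only
      rw [ih _ cur, ih (if cur > prev then 0 + (cur - 2 * prev) else 0 + cur) cur,
        Option.map_map]
      cases romanToIntGo rest 0 cur with
      | none => simp
      | some x => simp; split_ifs <;> ring

theorem lookupM : romanValues.lookup 'M' = some 1000 := by decide

theorem romanToIntGo_M (m : Nat) :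
    ∀ (r : List Char) (total : Int),
      romanToIntGo (List.replicate m 'M' ++ r) total 1000
        = romanToIntGo r (total + 1000 * m) 1000 := by
  induction m with
  | zero => intro r total; simp
  | succ k ih =>
    intro r total
    have step : romanToIntGo (List.replicate (k + 1) 'M' ++ r) total 1000
        = romanToIntGo (List.replicate k 'M' ++ r) (total + 1000) 1000 := by
      rw [List.replicate_succ, List.cons_append, romanToIntGo, lookupM]
      simp only
      rw [if_neg (by omega : ¬ ((1000 : Int) > 1000))]
    rw [step, ih]
    congr 1
    push_cast
    ring

theorem romanToIntGo_canon (m h t u : Nat) (hh : h < 10) (ht : t < 10) (hu : u < 10) :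
    romanToIntGo (canon m h t u) 0 0
      = some (1000 * (m : Int) + 100 * h + 10 * t + u) := by
  unfold canon
  cases m with
  | zero =>
    simpa using (low_eval h hh t ht u hu).1
  | succ k =>
    rw [List.replicate_succ, List.cons_append, romanToIntGo, lookupM]
    simp only
    rw [if_pos (by omega : (1000 : Int) > 0), romanToIntGo_M, romanToIntGo_shift,
      (low_eval h hh t ht u hu).2]
    have hmap : ∀ (x y : Int), (some x).map (y + ·) = some (y + x) := fun _ _ => rfl
    rw [hmap]
    congr 1
    push_cast
    ring

-- ---- int_to_roman characterisation ----

theorem flat_rep (m : Nat) (c : Char) :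
    (List.replicate m [c]).flatten = List.replicate m c := by
  induction m with
  | zero => simp
  | succ k ih => simp [List.replicate_succ, ih]

theorem intToRomanInner_eq (s : List Char) (v : Int) :
    ∀ (n : Nat) (roman : List Char) (num : Int),
      intToRomanInner s v n (roman, num)
        = (roman ++ (List.replicate n s).flatten, num - v * n) := by
  intro n
  induction n with
  | zero => intro roman num; simp [intToRomanInner]
  | succ k ih =>
    intro roman num
    rw [intToRomanInner, ih]
    simp only [List.replicate_succ, List.flatten_cons, Prod.mk.injEq]
    constructor
    · simp [List.append_assoc]
    · push_cast; ring

theorem intToRomanGo_acc (ds : List (Int × List Char)) :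
    ∀ (roman : List Char) (num : Int),
      intToRomanGo ds roman num = roman ++ intToRomanGo ds [] num := by
  induction ds with
  | nil => intro roman num; simp [intToRomanGo]
  | cons p rest ih =>
    intro roman num
    obtain ⟨v, s⟩ := p
    by_cases hpos : num > 0
    · rw [intToRomanGo, intToRomanGo, if_pos hpos, if_pos hpos]
      simp only [intToRomanInner_eq, List.nil_append]
      rw [ih ((List.replicate (PySem.Int.floordiv num v).toNat s).flatten) _,
        ih (roman ++ (List.replicate (PySem.Int.floordiv num v).toNat s).flatten) _]
      simp
    · rw [intToRomanGo, intToRomanGo, if_neg hpos, if_neg hpos]; simp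

theorem intToRoman_nonpos {n : Int} (h : n ≤ 0) : intToRoman n = [] := by
  have : ¬ n > 0 := by omega
  simp [intToRoman, romanDigits, intToRomanGo, this]

theorem intToRoman_canon (m h t u : Nat) (hh : h < 10) (ht : t < 10) (hu : u < 10)
    (hpos : 0 < 1000 * m + 100 * h + 10 * t + u) :
    intToRoman ((1000 * m + 100 * h + 10 * t + u : Nat) : Int) = canon m h t u := by
  have hd : romanDigits = (1000, ['M']) :: rest12 := by decide
  unfold intToRoman
  rw [hd, intToRomanGo]
  have hnum : ((1000 * m + 100 * h + 10 * t + u : Nat) : Int) > 0 := by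
    exact_mod_cast hpos
  rw [if_pos hnum]
  have hfd : (PySem.Int.floordiv ((1000 * m + 100 * h + 10 * t + u : Nat) : Int) 1000).toNat = m := by
    have h1000 : ((1000 : Nat) : Int) = (1000 : Int) := by norm_cast
    rw [← h1000, PySem.Int.floordiv_natCast]
    have : (1000 * m + 100 * h + 10 * t + u) / 1000 = m := by omega
    simp [this]
  rw [hfd]
  simp only [intToRomanInner_eq, List.nil_append, flat_rep]
  have hrem : ((1000 * m + 100 * h + 10 * t + u : Nat) : Int) - 1000 * m
      = ((100 * h + 10 * t + u : Nat) : Int) := by push_cast; ring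
  rw [hrem, intToRomanGo_acc, low_toRoman h hh t ht u hu]
  rfl

theorem digits_exist {n : Int} (hn : 1 ≤ n) :
    ∃ m h t u, h < 10 ∧ t < 10 ∧ u < 10 ∧
      n = ((1000 * m + 100 * h + 10 * t + u : Nat) : Int) ∧
      0 < 1000 * m + 100 * h + 10 * t + u := by
  refine ⟨n.toNat / 1000, n.toNat % 1000 / 100, n.toNat % 100 / 10, n.toNat % 10,
    by omega, by omega, by omega, ?_, by omega⟩
  omega

-- ---- per-word equivalence ----

theorem wordEq : ∀ w, romanToInt w = wordValue w := by
  intro w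
  by_cases hw : w = []
  · subst hw; rfl
  cases hB : wordValue w with
  | some n =>
    obtain ⟨m, h, t, u, hh, ht, hu, hcanon, hval⟩ := wordValue_some hB
    have hne : canon m h t u ≠ [] := hcanon ▸ hw
    have hpos : 0 < 1000 * m + 100 * h + 10 * t + u := by
      rcases Nat.eq_zero_or_pos (1000 * m + 100 * h + 10 * t + u) with h0 | h0
      · exfalso
        apply hne
        have hm : m = 0 := by omega
        have hhz : h = 0 := by omega
        have htz : t = 0 := by omega
        have huz : u = 0 := by omega
        subst hm hhz htz huz
        rfl
      · exact h0
    have hgo : romanToIntGo w 0 0 = some n := by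
      rw [hcanon, romanToIntGo_canon m h t u hh ht hu, hval]
    have hrt : intToRoman n = w := by
      have hn : n = ((1000 * m + 100 * h + 10 * t + u : Nat) : Int) := by
        rw [hval]; push_cast; ring
      rw [hn, intToRoman_canon m h t u hh ht hu hpos, hcanon]
    unfold romanToInt
    rw [if_neg hw, hgo]
    simp [hrt]
  | none =>
    unfold romanToInt
    rw [if_neg hw]
    cases hG : romanToIntGo w 0 0 with
    | none => rfl
    | some total =>
      simp only
      by_cases heq : intToRoman total = w
      · exfalso
        by_cases htot : total ≤ 0
        · exact hw (heq ▸ intToRoman_nonpos htot)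
        · obtain ⟨m, h, t, u, hh, ht, hu, hn, hpos⟩ := digits_exist (by omega : 1 ≤ total)
          have hcanon : w = canon m h t u := by
            rw [← heq, hn, intToRoman_canon m h t u hh ht hu hpos]
          have hne : canon m h t u ≠ [] := hcanon ▸ hw
          have hv := wordValue_canon m h t u hh ht hu hne
          rw [← hcanon, hB] at hv
          simp at hv
      · simp [heq]

-- ===== VERDICT =====
theorem roman_string_to_int_string_spec : Claim_equal_roman_string_to_int_string := by
  intro s _
  unfold Spec_roman_string_to_int_string roman_string_to_int_string roman_string_to_int_string_alt
  simp only [wordEq]
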